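-- pv_equiv track=rewrite | github.com/joshfwaldman1/econstats | core/economist_analysis.py | categorize_indicator
-- ===== SOURCE A (Python) =====
-- SERIES_CATEGORIES = {
--     # Labor Market
--     'UNRATE': 'labor',
--     'PAYEMS': 'labor',
--     'ICSA': 'labor',
--     'JTSJOL': 'labor',
--     'JTSQUR': 'labor',
--     'LNS12300060': 'labor',
--     'U6RATE': 'labor',
--     'CES0500000003': 'labor',  # Average hourly earnings
--     'AHETPI': 'labor',
--
--     # Inflation
--     'CPIAUCSL': 'inflation',
--     'CPILFESL': 'inflation',
--     'PCEPI': 'inflation',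
--     'PCEPILFE': 'inflation',
--     'CUSR0000SAH1': 'inflation',  # Shelter CPI
--     'CUSR0000SEHA': 'inflation',  # Rent CPI
--     'CPIUFDNS': 'inflation',  # Food CPI
--
--     # Growth/Output
--     'GDPC1': 'growth',
--     'A191RO1Q156NBEA': 'growth',  # GDP YoY
--     'A191RL1Q225SBEA': 'growth',  # GDP quarterly
--     'INDPRO': 'growth',  # Industrial production
--     'RSXFS': 'growth',  # Retail sales
--     'PCE': 'growth',  # Personal consumption
--
--     # Interest Rates / Fed
--     'FEDFUNDS': 'rates',
--     'DFF': 'rates',  # Daily Fed Funds effective rate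
--     'DGS10': 'rates',
--     'DGS2': 'rates',
--     'T10Y2Y': 'rates',
--     'MORTGAGE30US': 'rates',
--
--     # Recession Indicators
--     'SAHMREALTIME': 'recession',  # Sahm Rule Recession Indicator
--
--     # Housing
--     'CSUSHPINSA': 'housing',
--     'HOUST': 'housing',
--     'PERMIT': 'housing',
--     'EXHOSLUSM495S': 'housing',
--     'HSN1F': 'housing',
--     'MSPUS': 'housing',
--
--     # Consumer
--     'UMCSENT': 'consumer',
--     'PSAVERT': 'consumer',
--     'PI': 'consumer',
--     'DSPIC96': 'consumer',
--
--     # Financial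
--     'SP500': 'financial',
--     'VIXCLS': 'financial',
--     'BAA10Y': 'financial',
--     'NFCI': 'financial',
-- }
--
-- def categorize_indicator(series_id: str, name: str = "") -> str:
--     """
--     Determine the economic category of an indicator.
--
--     Args:
--         series_id: The FRED series ID or custom identifier
--         name: The human-readable name (used for fuzzy matching)
--
--     Returns:
--         Category string: 'labor', 'inflation', 'growth', 'rates', 'housing',
--         'consumer', 'financial', or 'other'
--     """
--     # Direct lookup
--     if series_id in SERIES_CATEGORIES:
--         return SERIES_CATEGORIES[series_id]
--
--     # Fuzzy matching by name
--     name_lower = name.lower()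
--
--     if any(term in name_lower for term in ['unemployment', 'payroll', 'job', 'employ', 'labor', 'wage', 'earnings']):
--         return 'labor'
--     elif any(term in name_lower for term in ['inflation', 'cpi', 'pce', 'price', 'cost']):
--         return 'inflation'
--     elif any(term in name_lower for term in ['gdp', 'growth', 'output', 'production', 'retail', 'sales']):
--         return 'growth'
--     elif any(term in name_lower for term in ['rate', 'treasury', 'yield', 'mortgage', 'fed fund']):
--         return 'rates'
--     elif any(term in name_lower for term in ['home', 'house', 'housing', 'rent', 'shelter']):
--         return 'housing'
--     elif any(term in name_lower for term in ['consumer', 'sentiment', 'confidence', 'saving', 'income']):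
--         return 'consumer'
--     elif any(term in name_lower for term in ['stock', 's&p', 'nasdaq', 'dow', 'vix', 'credit', 'spread']):
--         return 'financial'
--
--     return 'other'
-- ===== SOURCE B (Python) =====
-- SERIES_CATEGORIES = {
--     'UNRATE': 'labor', 'PAYEMS': 'labor', 'ICSA': 'labor', 'JTSJOL': 'labor',
--     'JTSQUR': 'labor', 'LNS12300060': 'labor', 'U6RATE': 'labor',
--     'CES0500000003': 'labor', 'AHETPI': 'labor',
--     'CPIAUCSL': 'inflation', 'CPILFESL': 'inflation', 'PCEPI': 'inflation',
--     'PCEPILFE': 'inflation', 'CUSR0000SAH1': 'inflation',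
--     'CUSR0000SEHA': 'inflation', 'CPIUFDNS': 'inflation',
--     'GDPC1': 'growth', 'A191RO1Q156NBEA': 'growth', 'A191RL1Q225SBEA': 'growth',
--     'INDPRO': 'growth', 'RSXFS': 'growth', 'PCE': 'growth',
--     'FEDFUNDS': 'rates', 'DFF': 'rates', 'DGS10': 'rates', 'DGS2': 'rates',
--     'T10Y2Y': 'rates', 'MORTGAGE30US': 'rates',
--     'SAHMREALTIME': 'recession',
--     'CSUSHPINSA': 'housing', 'HOUST': 'housing', 'PERMIT': 'housing',
--     'EXHOSLUSM495S': 'housing', 'HSN1F': 'housing', 'MSPUS': 'housing',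
--     'UMCSENT': 'consumer', 'PSAVERT': 'consumer', 'PI': 'consumer',
--     'DSPIC96': 'consumer',
--     'SP500': 'financial', 'VIXCLS': 'financial', 'BAA10Y': 'financial',
--     'NFCI': 'financial',
-- }
--
-- # Category names, indexed by priority (lower index = higher priority).
-- ORDER = ['labor', 'inflation', 'growth', 'rates', 'housing', 'consumer', 'financial']
--
-- # Flat (keyword, priority) pairs; priority is the index of the keyword's category in ORDER.
-- KEYWORD_PRIORITY = [
--     ('unemployment', 0), ('payroll', 0), ('job', 0), ('employ', 0), ('labor', 0), ('wage', 0), ('earnings', 0),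
--     ('inflation', 1), ('cpi', 1), ('pce', 1), ('price', 1), ('cost', 1),
--     ('gdp', 2), ('growth', 2), ('output', 2), ('production', 2), ('retail', 2), ('sales', 2),
--     ('rate', 3), ('treasury', 3), ('yield', 3), ('mortgage', 3), ('fed fund', 3),
--     ('home', 4), ('house', 4), ('housing', 4), ('rent', 4), ('shelter', 4),
--     ('consumer', 5), ('sentiment', 5), ('confidence', 5), ('saving', 5), ('income', 5),
--     ('stock', 6), ('s&p', 6), ('nasdaq', 6), ('dow', 6), ('vix', 6), ('credit', 6), ('spread', 6),
-- ]
--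
-- def categorize_indicator(series_id: str, name: str = "") -> str:
--     category = SERIES_CATEGORIES.get(series_id)
--     if category is not None:
--         return category
--     name_lower = name.lower()
--     # One flat scan collecting the priorities of all matching keywords; the
--     # best (minimum) priority names the category.
--     hits = [p for kw, p in KEYWORD_PRIORITY if kw in name_lower]
--     return ORDER[min(hits)] if hits else 'other'
-- ===== Notes on version B (the rewrite author's own statement) =====
-- stated objective: alternative
-- what changed: Instead of an ordered elif chain of any() tests with short-circuit priority, B does one flat scan over (keyword, priority) pairs collecting the priorities of all matching keywords and returns ORDER[min(hits)], turning the branch order into an argmin over a numeric priority.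
import Mathlib
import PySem

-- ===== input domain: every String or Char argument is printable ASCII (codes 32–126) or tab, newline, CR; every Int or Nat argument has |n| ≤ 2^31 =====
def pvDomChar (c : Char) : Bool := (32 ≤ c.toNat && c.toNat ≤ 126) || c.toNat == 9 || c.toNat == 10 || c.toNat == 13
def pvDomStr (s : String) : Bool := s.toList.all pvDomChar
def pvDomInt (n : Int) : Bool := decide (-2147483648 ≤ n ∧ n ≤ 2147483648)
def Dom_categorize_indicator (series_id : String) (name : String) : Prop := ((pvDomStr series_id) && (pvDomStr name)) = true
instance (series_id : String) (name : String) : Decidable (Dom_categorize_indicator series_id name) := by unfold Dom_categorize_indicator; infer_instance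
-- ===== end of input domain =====

-- B replaces the ordered elif chain by one flat scan over (keyword, priority) pairs followed by an argmin into the category table (alternative decomposition, same cost).

-- ===== PORT A =====
-- the module-level SERIES_CATEGORIES dict (shared data, used by both ports)
def pvSeriesCategories : PySem.Dict String String := PySem.Dict.ofList [
  ("UNRATE", "labor"), ("PAYEMS", "labor"), ("ICSA", "labor"), ("JTSJOL", "labor"),
  ("JTSQUR", "labor"), ("LNS12300060", "labor"), ("U6RATE", "labor"),
  ("CES0500000003", "labor"), ("AHETPI", "labor"),
  ("CPIAUCSL", "inflation"), ("CPILFESL", "inflation"), ("PCEPI", "inflation"),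
  ("PCEPILFE", "inflation"), ("CUSR0000SAH1", "inflation"),
  ("CUSR0000SEHA", "inflation"), ("CPIUFDNS", "inflation"),
  ("GDPC1", "growth"), ("A191RO1Q156NBEA", "growth"), ("A191RL1Q225SBEA", "growth"),
  ("INDPRO", "growth"), ("RSXFS", "growth"), ("PCE", "growth"),
  ("FEDFUNDS", "rates"), ("DFF", "rates"), ("DGS10", "rates"), ("DGS2", "rates"),
  ("T10Y2Y", "rates"), ("MORTGAGE30US", "rates"),
  ("SAHMREALTIME", "recession"),
  ("CSUSHPINSA", "housing"), ("HOUST", "housing"), ("PERMIT", "housing"),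
  ("EXHOSLUSM495S", "housing"), ("HSN1F", "housing"), ("MSPUS", "housing"),
  ("UMCSENT", "consumer"), ("PSAVERT", "consumer"), ("PI", "consumer"),
  ("DSPIC96", "consumer"),
  ("SP500", "financial"), ("VIXCLS", "financial"), ("BAA10Y", "financial"),
  ("NFCI", "financial")]

def categorize_indicator (series_id : String) (name : String) : String :=
  -- 'if series_id in SERIES_CATEGORIES: return SERIES_CATEGORIES[series_id]'
  match pvSeriesCategories.get? series_id with
  | some c => c
  | none =>
    let name_lower := PySem.Str.lower name
    if ["unemployment", "payroll", "job", "employ", "labor", "wage", "earnings"].any (fun t => PySem.Str.isIn t name_lower) then "labor"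
    else if ["inflation", "cpi", "pce", "price", "cost"].any (fun t => PySem.Str.isIn t name_lower) then "inflation"
    else if ["gdp", "growth", "output", "production", "retail", "sales"].any (fun t => PySem.Str.isIn t name_lower) then "growth"
    else if ["rate", "treasury", "yield", "mortgage", "fed fund"].any (fun t => PySem.Str.isIn t name_lower) then "rates"
    else if ["home", "house", "housing", "rent", "shelter"].any (fun t => PySem.Str.isIn t name_lower) then "housing"
    else if ["consumer", "sentiment", "confidence", "saving", "income"].any (fun t => PySem.Str.isIn t name_lower) then "consumer"
    else if ["stock", "s&p", "nasdaq", "dow", "vix", "credit", "spread"].any (fun t => PySem.Str.isIn t name_lower) then "financial"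
    else "other"

-- ===== PORT B =====
-- ORDER: category names, indexed by priority
def pvOrder : List String := ["labor", "inflation", "growth", "rates", "housing", "consumer", "financial"]

-- KEYWORD_PRIORITY: flat (keyword, priority) pairs
def pvKeywordPriority : List (String × Nat) := [
  ("unemployment", 0), ("payroll", 0), ("job", 0), ("employ", 0), ("labor", 0), ("wage", 0), ("earnings", 0),
  ("inflation", 1), ("cpi", 1), ("pce", 1), ("price", 1), ("cost", 1),
  ("gdp", 2), ("growth", 2), ("output", 2), ("production", 2), ("retail", 2), ("sales", 2),
  ("rate", 3), ("treasury", 3), ("yield", 3), ("mortgage", 3), ("fed fund", 3),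
  ("home", 4), ("house", 4), ("housing", 4), ("rent", 4), ("shelter", 4),
  ("consumer", 5), ("sentiment", 5), ("confidence", 5), ("saving", 5), ("income", 5),
  ("stock", 6), ("s&p", 6), ("nasdaq", 6), ("dow", 6), ("vix", 6), ("credit", 6), ("spread", 6)]

def categorize_indicator_alt (series_id : String) (name : String) : String :=
  match pvSeriesCategories.get? series_id with
  | some c => c
  | none =>
    let name_lower := PySem.Str.lower name
    -- hits = [p for kw, p in KEYWORD_PRIORITY if kw in name_lower]
    let hits := (pvKeywordPriority.filter (fun kp => PySem.Str.isIn kp.1 name_lower)).map (fun kp => kp.2)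
    -- return ORDER[min(hits)] if hits else 'other'
    match hits.min? with
    | none => "other"
    | some m => (PySem.List.pyGet? pvOrder (Int.ofNat m)).getD "other"  -- m ≤ 6 < |ORDER|: the index is always in range, the default is never used

-- ===== PRECONDITION & SPEC =====
def Spec_categorize_indicator (series_id : String) (name : String) (out : String) : Prop := out = categorize_indicator_alt series_id name
instance (series_id : String) (name : String) (out : String) : Decidable (Spec_categorize_indicator series_id name out) := by unfold Spec_categorize_indicator; infer_instance

-- ===== CLAIM =====
def Claim_equal_categorize_indicator : Prop := ∀ (series_id : String) (name : String), Dom_categorize_indicator series_id name → Spec_categorize_indicator series_id name (categorize_indicator series_id name)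

-- ===== LEMMAS AND PROOFS =====

-- min of hits over a flat list, as computed by B's port
def pvMinHits (l : List (String × Nat)) (nl : String) : Option Nat :=
  ((l.filter (fun kp => PySem.Str.isIn kp.1 nl)).map (fun kp => kp.2)).min?

lemma foldl_min_of_le (l : List Nat) (p : Nat) (h : ∀ x ∈ l, p ≤ x) : l.foldl min p = p := by
  induction l with
  | nil => rfl
  | cons a as ih =>
    have : min p a = p := Nat.min_eq_left (h a (by simp))
    simp only [List.foldl, this]
    exact ih (fun x hx => h x (by simp [hx]))

-- the min over one category segment (all priority p) followed by rest (priorities ≥ p)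
lemma pvMinHits_segment (terms : List String) (p : Nat) (rest : List (String × Nat)) (nl : String)
    (h : ∀ q ∈ rest, p ≤ q.2) :
    pvMinHits (terms.map (fun t => (t, p)) ++ rest) nl =
      if terms.any (fun t => PySem.Str.isIn t nl) then some p else pvMinHits rest nl := by
  induction terms with
  | nil => simp [pvMinHits]
  | cons t ts ih =>
    by_cases hm : PySem.Str.isIn t nl = true
    · simp only [List.map_cons, List.cons_append, pvMinHits, List.filter_cons, if_pos,
        List.map_cons, List.any_cons, hm, Bool.true_or, List.min?]
      congr 1
      apply foldl_min_of_le
      intro x hx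
      simp only [List.mem_map, List.mem_filter, List.mem_append, List.mem_map] at hx
      obtain ⟨kp, ⟨hmem, -⟩, rfl⟩ := hx
      rcases hmem with h1 | h2
      · obtain ⟨t', -, rfl⟩ := h1; exact le_refl p
      · exact h kp h2
    · simp only [Bool.not_eq_true] at hm
      simp only [List.map_cons, List.cons_append, pvMinHits, List.filter_cons, hm, List.any_cons,
        Bool.false_or, Bool.false_eq_true, if_false] at *
      exact ih

lemma pvMinHits_nil (nl : String) : pvMinHits [] nl = none := rfl

-- ===== VERDICT =====
theorem categorize_indicator_spec : Claim_equal_categorize_indicator := by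
  intro series_id name _
  unfold Spec_categorize_indicator categorize_indicator categorize_indicator_alt
  cases pvSeriesCategories.get? series_id with
  | some c => rfl
  | none =>
    simp only
    set nl := PySem.Str.lower name with hnl
    -- rewrite B's hits-min as the 7-segment chain
    have hkw : pvKeywordPriority =
        (["unemployment", "payroll", "job", "employ", "labor", "wage", "earnings"].map (fun t => (t, 0))) ++
        ((["inflation", "cpi", "pce", "price", "cost"].map (fun t => (t, 1))) ++
        ((["gdp", "growth", "output", "production", "retail", "sales"].map (fun t => (t, 2))) ++
        ((["rate", "treasury", "yield", "mortgage", "fed fund"].map (fun t => (t, 3))) ++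
        ((["home", "house", "housing", "rent", "shelter"].map (fun t => (t, 4))) ++
        ((["consumer", "sentiment", "confidence", "saving", "income"].map (fun t => (t, 5))) ++
        ((["stock", "s&p", "nasdaq", "dow", "vix", "credit", "spread"].map (fun t => (t, 6))) ++
        ([] : List (String × Nat)))))))) := by rfl
    have hB : ((pvKeywordPriority.filter (fun kp => PySem.Str.isIn kp.1 nl)).map (fun kp => kp.2)).min? = pvMinHits pvKeywordPriority nl := rfl
    rw [hB, hkw,
      pvMinHits_segment _ 0 _ nl (by decide), pvMinHits_segment _ 1 _ nl (by decide),
      pvMinHits_segment _ 2 _ nl (by decide), pvMinHits_segment _ 3 _ nl (by decide),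
      pvMinHits_segment _ 4 _ nl (by decide), pvMinHits_segment _ 5 _ nl (by decide),
      pvMinHits_segment _ 6 _ nl (by decide), pvMinHits_nil]
    split_ifs <;> rfl
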